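-- pv_equiv track=rewrite | github.com/Dharshinisri2005/automataexam | q7.py | is_accepted_by_pda
-- ===== SOURCE A (Python) =====
-- def is_accepted_by_pda(string):
--     stack = []
--
--     for symbol in string:
--         if symbol == 'a':
--             stack.append('a')
--         elif symbol == 'b':
--             if stack:
--                 stack.pop()
--             else:
--                 return False
--         else:
--             return False
--
--     return len(stack) == 0
-- ===== SOURCE B (Python) =====
-- def is_accepted_by_pda(string):
--     # Rewrite to normal form: repeatedly cancel every "ab" pair until no
--     # occurrence remains; the string is accepted iff it reduces to "".
--     s = string
--     while "ab" in s:
--         s = s.replace("ab", "")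
--     return s == ""
-- ===== Notes on version B (the rewrite author's own statement) =====
-- stated objective: alternative
-- what changed: Replaces A's one-pass stack automaton by a string-rewriting fixpoint: repeatedly delete every "ab" occurrence with str.replace until none remains and accept iff the string has reduced to empty.
import Mathlib
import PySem

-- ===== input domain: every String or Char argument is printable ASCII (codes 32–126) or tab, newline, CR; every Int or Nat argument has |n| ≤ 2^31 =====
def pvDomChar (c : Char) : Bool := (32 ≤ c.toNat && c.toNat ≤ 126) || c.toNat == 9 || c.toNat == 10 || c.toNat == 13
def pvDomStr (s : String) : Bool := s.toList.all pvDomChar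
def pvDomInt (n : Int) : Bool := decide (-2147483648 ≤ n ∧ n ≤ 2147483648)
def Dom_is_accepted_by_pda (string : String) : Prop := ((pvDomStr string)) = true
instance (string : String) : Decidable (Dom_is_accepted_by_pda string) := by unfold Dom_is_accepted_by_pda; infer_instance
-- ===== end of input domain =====

-- B replaces A's one-pass stack automaton by a string-rewriting fixpoint:
-- repeatedly delete every "ab" occurrence until none remains, accept iff the
-- string reduced to empty (alternative algorithm, not faster).


-- ===== PORT A =====
-- the per-symbol loop carrying the stack; early returns become `false` results
def pdaGo : List Char → List Char → Bool
  | [], st => st.length == 0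
  | c :: cs, st =>
    if c = 'a' then pdaGo cs ('a' :: st)
    else if c = 'b' then
      match st with
      | [] => false
      | _ :: t => pdaGo cs t
    else false

def is_accepted_by_pda (string : String) : Bool := pdaGo string.toList []

-- ===== PORT B =====
-- termination facts for the while loop: one `s.replace("ab", "")` pass never
-- lengthens the string, and strictly shortens it while "ab" occurs in it
lemma replace_go_ab_len_le (fuel : Nat) : ∀ (l acc : List Char),
    (PySem.Chars.replace.go ['a', 'b'] [] fuel l acc).length ≤ acc.length + l.length := by
  induction fuel with
  | zero => intro l acc; simp [PySem.Chars.replace.go]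
  | succ fuel ih =>
    intro l acc
    match l with
    | [] => simp [PySem.Chars.replace.go]
    | c :: t =>
      rw [PySem.Chars.replace.go]
      by_cases hp : List.isPrefixOf ['a', 'b'] (c :: t) = true
      · rw [if_pos hp]
        match t with
        | [] => simp [List.isPrefixOf] at hp
        | d :: t' =>
          simpa using le_trans (ih t' acc) (by simp; omega)
      · rw [if_neg hp]
        have := ih t (c :: acc)
        simpa using le_trans this (by simp; omega)

lemma replace_go_ab_len_lt (fuel : Nat) : ∀ (l acc : List Char), l.length ≤ fuel →
    (['a', 'b'] <:+: l) →
    (PySem.Chars.replace.go ['a', 'b'] [] fuel l acc).length < acc.length + l.length := by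
  induction fuel with
  | zero =>
    intro l acc hlen hinf
    match l with
    | [] => simp at hinf
    | c :: t => simp at hlen
  | succ fuel ih =>
    intro l acc hlen hinf
    match l with
    | [] => simp at hinf
    | c :: t =>
      rw [PySem.Chars.replace.go]
      by_cases hp : List.isPrefixOf ['a', 'b'] (c :: t) = true
      · rw [if_pos hp]
        match t with
        | [] => simp [List.isPrefixOf] at hp
        | d :: t' =>
          have := replace_go_ab_len_le fuel t' acc
          simp only [List.drop_succ_cons, List.drop_zero, List.reverse_nil,
            List.nil_append, List.length]
          omega
      · rw [if_neg hp]
        have hpre : ¬ (['a', 'b'] <+: c :: t) := by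
          intro h; exact hp (List.isPrefixOf_iff_prefix.mpr h)
        have hinf' : ['a', 'b'] <:+: t := by
          rcases List.infix_cons_iff.mp hinf with h | h
          · exact absurd h hpre
          · exact h
        have := ih t (c :: acc) (by simp at hlen ⊢; omega) hinf'
        simpa using lt_of_lt_of_le this (by simp; omega)

lemma replace_ab_length_lt (l : List Char) (h : PySem.Chars.isIn ['a', 'b'] l = true) :
    (PySem.Chars.replace l ['a', 'b'] []).length < l.length := by
  have hinf : ['a', 'b'] <:+: l := (PySem.Chars.isIn_iff_infix _ _).mp h
  have := replace_go_ab_len_lt l.length l [] le_rfl hinf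
  simpa [PySem.Chars.replace] using this

-- Python's `while "ab" in s: s = s.replace("ab", "")` on the char-list side
-- (PySem.Str's isIn/replace are thin wrappers of these PySem.Chars functions)
def pdaReduce (l : List Char) : List Char :=
  if h : PySem.Chars.isIn ['a', 'b'] l = true then
    pdaReduce (PySem.Chars.replace l ['a', 'b'] [])
  else l
termination_by l.length
decreasing_by exact replace_ab_length_lt l h

-- `return s == ""` is the emptiness test on the reduced char list
def is_accepted_by_pda_alt (string : String) : Bool := pdaReduce string.toList == []

-- ===== PRECONDITION & SPEC =====
def Spec_is_accepted_by_pda (string : String) (out : Bool) : Prop := out = is_accepted_by_pda_alt string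
instance (string : String) (out : Bool) : Decidable (Spec_is_accepted_by_pda string out) := by unfold Spec_is_accepted_by_pda; infer_instance

-- ===== CLAIM (what is proved, stated in full; the proofs are below) =====
def Claim_equal_is_accepted_by_pda : Prop := ∀ (string : String), Dom_is_accepted_by_pda string → Spec_is_accepted_by_pda string (is_accepted_by_pda string)

-- ===== LEMMAS AND PROOFS =====

/-- One left-to-right pass deleting non-overlapping "ab" occurrences:
    the specification of `s.replace("ab", "")`. -/
def removeAb : List Char → List Char
  | [] => []
  | [c] => [c]
  | c :: d :: t => if c = 'a' ∧ d = 'b' then removeAb t else c :: removeAb (d :: t)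

lemma replace_go_ab_spec (fuel : Nat) : ∀ (l acc : List Char), l.length ≤ fuel →
    PySem.Chars.replace.go ['a', 'b'] [] fuel l acc = acc.reverse ++ removeAb l := by
  induction fuel with
  | zero =>
    intro l acc hlen
    match l with
    | [] => simp [PySem.Chars.replace.go, removeAb]
    | c :: t => simp at hlen
  | succ fuel ih =>
    intro l acc hlen
    match l with
    | [] => simp [PySem.Chars.replace.go, removeAb]
    | [c] =>
      rw [PySem.Chars.replace.go]
      have hp : List.isPrefixOf ['a', 'b'] [c] = false := by simp [List.isPrefixOf]
      rw [ih [] (c :: acc) (by simp)] <;> simp [hp, removeAb]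
    | c :: d :: t =>
      rw [PySem.Chars.replace.go]
      by_cases hp : List.isPrefixOf ['a', 'b'] (c :: d :: t) = true
      · have hcd : c = 'a' ∧ d = 'b' := by
          have := List.isPrefixOf_iff_prefix.mp hp
          rcases List.cons_prefix_cons.mp this with ⟨h1, h2⟩
          rcases List.cons_prefix_cons.mp h2 with ⟨h3, _⟩
          exact ⟨h1.symm, h3.symm⟩
        rw [if_pos hp]
        simp only [List.length_cons] at hlen
        rw [show List.drop (['a', 'b'] : List Char).length (c :: d :: t) = t from rfl]
        simp only [List.reverse_nil, List.nil_append]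
        rw [ih t acc (by omega)]
        simp [removeAb, hcd]
      · have hcd : ¬ (c = 'a' ∧ d = 'b') := by
          rintro ⟨h1, h2⟩; subst h1; subst h2; simp [List.isPrefixOf] at hp
        rw [if_neg hp]
        simp only [List.length_cons] at hlen
        rw [ih (d :: t) (c :: acc) (by simp; omega)]
        simp [removeAb, hcd]

lemma replace_ab_eq_removeAb (l : List Char) :
    PySem.Chars.replace l ['a', 'b'] [] = removeAb l := by
  simpa [PySem.Chars.replace] using replace_go_ab_spec l.length l [] le_rfl

/-- Deleting the "ab" pairs of one pass does not change A's stack run: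
    each deleted pair is a push immediately undone by a pop. -/
lemma pdaGo_removeAb (l : List Char) : ∀ st, pdaGo (removeAb l) st = pdaGo l st := by
  induction l using removeAb.induct with
  | case1 => intro st; rfl
  | case2 c => intro st; rfl
  | case3 c d t hcd ih =>
    intro st
    obtain ⟨h1, h2⟩ := hcd; subst h1; subst h2
    rw [removeAb, if_pos ⟨rfl, rfl⟩]
    rw [ih st]
    simp [pdaGo]
  | case4 c d t hcd ih =>
    intro st
    rw [removeAb, if_neg hcd]
    by_cases hca : c = 'a'
    · subst hca
      simp only [pdaGo]
      exact ih _
    · by_cases hcb : c = 'b'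
      · subst hcb
        match st with
        | [] => simp [pdaGo]
        | _ :: st' =>
          simp only [pdaGo, hca, reduceIte]
          exact ih _
      · simp [pdaGo, hca, hcb]

/-- A string starting with 'a' and containing no "ab" can never be accepted. -/
lemma pdaGo_a_noab (t : List Char) : ∀ st, ¬ (['a', 'b'] <:+: ('a' :: t)) →
    pdaGo ('a' :: t) st = false := by
  induction t with
  | nil => intro st _; simp [pdaGo]
  | cons c t' ih =>
    intro st hinf
    have hcb : c ≠ 'b' := by
      rintro rfl
      exact hinf ⟨[], t', rfl⟩
    show pdaGo (c :: t') ('a' :: st) = false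
    by_cases hca : c = 'a'
    · subst hca
      exact ih _ (fun h => hinf (List.infix_cons h))
    · simp [pdaGo, hca, hcb]

/-- On an "ab"-free string, A accepts iff the string is empty. -/
lemma pdaGo_noab (l : List Char) (h : ¬ (['a', 'b'] <:+: l)) :
    pdaGo l [] = decide (l = []) := by
  match l with
  | [] => rfl
  | c :: t =>
    by_cases hca : c = 'a'
    · subst hca; rw [pdaGo_a_noab t [] h]; simp
    · by_cases hcb : c = 'b'
      · subst hcb; simp [pdaGo, hca]
      · simp [pdaGo, hca, hcb]

lemma pdaGo_pdaReduce (l : List Char) :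
    pdaGo (pdaReduce l) [] = pdaGo l [] ∧ ¬ (['a', 'b'] <:+: pdaReduce l) := by
  induction l using pdaReduce.induct with
  | case1 l h ih =>
    rw [pdaReduce, dif_pos h]
    refine ⟨?_, ih.2⟩
    rw [ih.1, replace_ab_eq_removeAb, pdaGo_removeAb]
  | case2 l h =>
    rw [pdaReduce, dif_neg h]
    exact ⟨rfl, fun hinf => h ((PySem.Chars.isIn_iff_infix _ _).mpr hinf)⟩

lemma pda_core (s : String) : is_accepted_by_pda s = is_accepted_by_pda_alt s := by
  unfold is_accepted_by_pda is_accepted_by_pda_alt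
  obtain ⟨h1, h2⟩ := pdaGo_pdaReduce s.toList
  rw [← h1, pdaGo_noab _ h2]
  cases pdaReduce s.toList <;> simp

-- ===== VERDICT (by name: the statement is the Claim_ definition above) =====
theorem is_accepted_by_pda_spec : Claim_equal_is_accepted_by_pda := by
  intro s _
  unfold Spec_is_accepted_by_pda
  exact pda_core s
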